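-- pv_equiv track=rewrite | github.com/Amadou-Marong/DataStructuresAndAlgorithms | Python/ArrayProblems/Easy/SumOfAllSubarrays.py | sum_of_all_subarrays
-- ===== SOURCE A (Python) =====
-- def sum_of_all_subarrays(arr):
--     n = len(arr)
--     result = 0
--
--     # outer loop to pick the starting index of the subarray
--     for start in range(n):
--
--         # inner loop to pick the ending index of the subarray
--         for end in range(start, n):
--
--             # slice the array from start to end and print it
--             subarray = arr[start:end + 1]
--
--             for item in subarray:
--                 result += item
--
--     return result
-- ===== SOURCE B (Python) =====
-- def sum_of_all_subarrays(arr):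
--     n = len(arr)
--     return sum(x * (i + 1) * (n - i) for i, x in enumerate(arr))
-- ===== Notes on version B (the rewrite author's own statement) =====
-- stated objective: faster
-- what changed: Replaced the triple nested loop (all start/end pairs, summing each slice element by element) by the closed-form contribution formula sum(arr[i]*(i+1)*(n-i)) computed in one pass.
import Mathlib
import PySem

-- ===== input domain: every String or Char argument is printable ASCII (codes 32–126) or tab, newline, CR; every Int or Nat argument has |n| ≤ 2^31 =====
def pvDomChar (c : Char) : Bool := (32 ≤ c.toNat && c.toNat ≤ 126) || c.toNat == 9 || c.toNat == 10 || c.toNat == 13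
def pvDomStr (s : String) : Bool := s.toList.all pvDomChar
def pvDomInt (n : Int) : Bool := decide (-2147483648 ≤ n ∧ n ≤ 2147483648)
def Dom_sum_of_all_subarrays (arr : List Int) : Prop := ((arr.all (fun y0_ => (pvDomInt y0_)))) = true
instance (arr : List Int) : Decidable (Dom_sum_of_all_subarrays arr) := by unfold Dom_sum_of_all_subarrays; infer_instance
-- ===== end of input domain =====

-- B replaces A's triple nested loop by the one-pass contribution formula sum(arr[i]*(i+1)*(n-i)) (objective: faster, O(n^3) → O(n)).

-- ===== PORT A =====
-- literal transliteration of A's triple loop: for start in range(n): for end in range(start, n): for item in arr[start:end+1]: result += item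
def sum_of_all_subarrays (arr : List Int) : Int :=
  let n : Int := arr.length
  (PySem.List.pyRange 0 n 1).foldl (fun result start =>
    (PySem.List.pyRange start n 1).foldl (fun result e =>
      (PySem.List.slice arr (some start) (some (e + 1))).foldl
        (fun result item => result + item) result) result) 0

-- ===== PORT B =====
-- literal transliteration of B: sum(x * (i + 1) * (n - i) for i, x in enumerate(arr))
def sum_of_all_subarrays_alt (arr : List Int) : Int :=
  let n : Int := arr.length
  ((PySem.List.enumerate arr 0).map (fun p => p.2 * (p.1 + 1) * (n - p.1))).sum

-- ===== PRECONDITION & SPEC =====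
def Spec_sum_of_all_subarrays (arr : List Int) (out : Int) : Prop := out = sum_of_all_subarrays_alt arr
instance (arr : List Int) (out : Int) : Decidable (Spec_sum_of_all_subarrays arr out) := by unfold Spec_sum_of_all_subarrays; infer_instance

-- ===== CLAIM (what is proved, stated in full; the proofs are below) =====
def Claim_equal_sum_of_all_subarrays : Prop := ∀ (arr : List Int), Dom_sum_of_all_subarrays arr → Spec_sum_of_all_subarrays arr (sum_of_all_subarrays arr)

-- ===== LEMMAS AND PROOFS =====

-- sum of all nonempty prefix sums of ys
def prefSums : List Int → Int
  | [] => 0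
  | y :: ys => y * (ys.length + 1) + prefSums ys

-- sum over all suffixes of their prefSums = total sum over all subarrays
def tri : List Int → Int
  | [] => 0
  | x :: xs => prefSums (x :: xs) + tri xs

-- Σ_{j<|ys|} (ys.take (j+1)).sum = prefSums ys
theorem sum_takes_eq_prefSums (ys : List Int) :
    ((List.range ys.length).map (fun j => (ys.take (j + 1)).sum)).sum = prefSums ys := by
  induction ys with
  | nil => simp [prefSums]
  | cons y ys ih =>
    calc ((List.range (y :: ys).length).map (fun j => ((y :: ys).take (j + 1)).sum)).sum
        = ((List.range (ys.length + 1)).map (fun j => y + (ys.take j).sum)).sum := by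
          simp [List.take_succ_cons]
      _ = ((List.range (ys.length + 1)).map (fun _ => y)).sum
          + ((List.range (ys.length + 1)).map (fun j => (ys.take j).sum)).sum := by
          rw [← List.sum_map_add]
      _ = y * (ys.length + 1) + ((List.range (ys.length + 1)).map (fun j => (ys.take j).sum)).sum := by
          simp [List.sum_replicate, mul_comm]
      _ = y * (ys.length + 1) + prefSums ys := by
          rw [List.range_succ_eq_map]
          simp only [List.map_cons, List.map_map, List.sum_cons, List.take_zero, List.sum_nil]
          rw [show ((List.range ys.length).map ((fun j => (ys.take j).sum) ∘ Nat.succ))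
              = (List.range ys.length).map (fun j => (ys.take (j + 1)).sum) from rfl, ih]
          ring

-- Σ_{s<|xs|} prefSums (xs.drop s) = tri xs
theorem sum_drops_eq_tri (xs : List Int) :
    ((List.range xs.length).map (fun s => prefSums (xs.drop s))).sum = tri xs := by
  induction xs with
  | nil => simp [tri]
  | cons x xs ih =>
    rw [show (x :: xs).length = xs.length + 1 from rfl, List.range_succ_eq_map]
    simp only [List.map_cons, List.map_map, List.sum_cons, List.drop_zero]
    rw [show ((List.range xs.length).map ((fun s => prefSums ((x :: xs).drop s)) ∘ Nat.succ))
        = (List.range xs.length).map (fun s => prefSums (xs.drop s)) from rfl, ih]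
    rfl

-- Port A computes tri
theorem portA_eq_tri (arr : List Int) : sum_of_all_subarrays arr = tri arr := by
  unfold sum_of_all_subarrays
  rw [PySem.List.foldl_congr_mem _ _
      (fun result start => result + ((PySem.List.pyRange start (arr.length : Int) 1).map
        (fun e => (PySem.List.slice arr (some start) (some (e + 1))).sum)).sum) 0
      (by
        intro acc start _
        rw [PySem.List.foldl_congr_mem _ _
            (fun result e => result + (PySem.List.slice arr (some start) (some (e + 1))).sum) acc
            (by
              intro acc' e _
              rw [PySem.List.foldl_add _ (fun x => x) acc']
              simp)]
        rw [PySem.List.foldl_add _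
            (fun e => (PySem.List.slice arr (some start) (some (e + 1))).sum) acc])]
  rw [PySem.List.foldl_add _
      (fun start => ((PySem.List.pyRange start (arr.length : Int) 1).map
        (fun e => (PySem.List.slice arr (some start) (some (e + 1))).sum)).sum) 0]
  rw [PySem.List.pyRange_zero_nat arr.length, List.map_map, zero_add]
  rw [← sum_drops_eq_tri]
  apply congrArg
  apply List.map_congr_left
  intro s hs
  have hs' : s < arr.length := List.mem_range.mp hs
  show ((PySem.List.pyRange (s : Int) (arr.length : Int) 1).map
      (fun e => (PySem.List.slice arr (some (s : Int)) (some (e + 1))).sum)).sum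
      = prefSums (arr.drop s)
  rw [PySem.List.pyRange_one, List.map_map]
  have hlen : ((arr.length : Int) - (s : Int)).toNat = (arr.drop s).length := by
    simp
  rw [hlen, ← sum_takes_eq_prefSums]
  apply congrArg
  apply List.map_congr_left
  intro k _
  show (PySem.List.slice arr (some (s : Int)) (some ((s : Int) + (k : Int) + 1))).sum
      = ((arr.drop s).take (k + 1)).sum
  have : ((s : Int) + (k : Int) + 1) = ((s : Int) + ((k + 1 : Nat) : Int)) := by push_cast; ring
  rw [this, PySem.List.slice_natCast_add]

-- Port B's enumerate sum, generalized over the start index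
theorem enum_sum_eq (xs : List Int) : ∀ (s n : Int), n = s + xs.length →
    ((PySem.List.enumerate xs s).map (fun p => p.2 * (p.1 + 1) * (n - p.1))).sum
      = tri xs + s * prefSums xs := by
  induction xs with
  | nil => intro s n _; simp [PySem.List.enumerate_nil, tri, prefSums]
  | cons x xs ih =>
    intro s n hn
    rw [PySem.List.enumerate_cons]
    simp only [List.map_cons, List.sum_cons]
    rw [ih (s + 1) n (by rw [hn]; push_cast [List.length_cons]; ring)]
    have hx : n - s = (xs.length : Int) + 1 := by rw [hn]; push_cast [List.length_cons]; ring
    show x * (s + 1) * (n - s) + (tri xs + (s + 1) * prefSums xs)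
        = tri (x :: xs) + s * prefSums (x :: xs)
    rw [hx, show tri (x :: xs) = prefSums (x :: xs) + tri xs from rfl,
        show prefSums (x :: xs) = x * ((xs.length : Int) + 1) + prefSums xs from rfl]
    ring

theorem portB_eq_tri (arr : List Int) : sum_of_all_subarrays_alt arr = tri arr := by
  unfold sum_of_all_subarrays_alt
  rw [enum_sum_eq arr 0 (arr.length : Int) (by simp)]
  ring

-- ===== VERDICT (by name: the statement is the Claim_ definition above) =====
theorem sum_of_all_subarrays_spec : Claim_equal_sum_of_all_subarrays := by
  intro arr _
  show sum_of_all_subarrays arr = sum_of_all_subarrays_alt arr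
  rw [portA_eq_tri, portB_eq_tri]
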